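-- pv_equiv track=rewrite | github.com/danherbriley/acm4 | 05/b.py | count
-- ===== SOURCE A (Python) =====
-- def count(string):
--     res = 0
--     blanks = 0
--     for char in string:
--         if char == "+":
--             res += 1
--         elif char == "-":
--             res -= 1
--         elif char == "?":
--             blanks += 1
--     return res, blanks
-- ===== SOURCE B (Python) =====
-- def count(string):
--     return string.count("+") - string.count("-"), string.count("?")
-- ===== Notes on version B (the rewrite author's own statement) =====
-- stated objective: faster
-- what changed: Replaces the fused per-character Python loop with three independent str.count library scans combined arithmetically.
import Mathlib
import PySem

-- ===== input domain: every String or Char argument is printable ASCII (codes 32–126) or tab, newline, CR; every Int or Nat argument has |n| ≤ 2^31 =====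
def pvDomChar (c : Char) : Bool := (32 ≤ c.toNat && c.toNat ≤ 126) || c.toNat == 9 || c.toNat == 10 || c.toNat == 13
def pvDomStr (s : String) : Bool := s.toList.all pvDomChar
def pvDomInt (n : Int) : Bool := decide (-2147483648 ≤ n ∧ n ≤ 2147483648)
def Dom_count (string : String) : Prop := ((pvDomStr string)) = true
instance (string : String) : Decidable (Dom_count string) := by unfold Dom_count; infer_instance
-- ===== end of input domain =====

-- B replaces A's fused per-character tally loop with three independent str.count scans combined arithmetically (measured faster: C-level scans vs a Python-level loop).

-- ===== PORT A =====
def count (string : String) : Int × Int :=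
  string.toList.foldl
    (fun (st : Int × Int) char =>
      if char == '+' then (st.1 + 1, st.2)
      else if char == '-' then (st.1 - 1, st.2)
      else if char == '?' then (st.1, st.2 + 1)
      else st)
    (0, 0)

-- ===== PORT B =====
def count_alt (string : String) : Int × Int :=
  ((PySem.Str.count string "+" : Int) - (PySem.Str.count string "-" : Int),
   (PySem.Str.count string "?" : Int))

-- ===== PRECONDITION & SPEC =====
def Spec_count (string : String) (out : Int × Int) : Prop := out = count_alt string
instance (string : String) (out : Int × Int) : Decidable (Spec_count string out) := by unfold Spec_count; infer_instance

-- ===== CLAIM (what is proved, stated in full; the proofs are below) =====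
def Claim_equal_count : Prop := ∀ (string : String), Dom_count string → Spec_count string (count string)

-- ===== LEMMAS AND PROOFS =====

theorem count_go_singleton (c : Char) : ∀ (fuel : Nat) (l : List Char) (acc : Nat),
    l.length ≤ fuel → PySem.Chars.count.go [c] fuel l acc = acc + l.count c
  | 0, [], acc, _ => by simp [PySem.Chars.count.go]
  | 0, (h :: t), acc, hle => by simp at hle
  | (Nat.succ f), [], acc, _ => by simp [PySem.Chars.count.go]
  | (Nat.succ f), (h :: t), acc, hle => by
      simp only [PySem.Chars.count.go]
      by_cases hc : h = c
      · have : ([c].isPrefixOf (h :: t)) = true := by simp [hc, List.isPrefixOf]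
        rw [if_pos this]
        simp only [List.length_singleton, List.drop_one, List.tail_cons]
        rw [count_go_singleton c f t (acc + 1) (by simpa using hle)]
        simp [hc]; omega
      · have hpf : ([c].isPrefixOf (h :: t)) = false := by
          simp [List.isPrefixOf]; exact fun h' => hc h'.symm
        rw [if_neg (by simp [hpf])]
        rw [count_go_singleton c f t acc (by simpa using hle)]
        simp [hc]

theorem chars_count_singleton (c : Char) (l : List Char) :
    PySem.Chars.count l [c] = l.count c := by
  simp [PySem.Chars.count, count_go_singleton c l.length l 0 le_rfl]

theorem count_fold_inv (l : List Char) (a b : Int) :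
    l.foldl
      (fun (st : Int × Int) char =>
        if char == '+' then (st.1 + 1, st.2)
        else if char == '-' then (st.1 - 1, st.2)
        else if char == '?' then (st.1, st.2 + 1)
        else st)
      (a, b)
    = (a + (l.count '+' : Int) - (l.count '-' : Int), b + (l.count '?' : Int)) := by
  induction l generalizing a b with
  | nil => simp
  | cons h t ih =>
      rw [List.foldl_cons]
      by_cases h1 : h = '+'
      · rw [if_pos (by simp [h1]), ih]; simp [h1]; omega
      · by_cases h2 : h = '-'
        · rw [if_neg (by simp [h1]), if_pos (by simp [h2]), ih]
          simp [h2]; omega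
        · by_cases h3 : h = '?'
          · rw [if_neg (by simp [h1]), if_neg (by simp [h2]), if_pos (by simp [h3]), ih]
            simp [h3]; ring
          · rw [if_neg (by simp [h1]), if_neg (by simp [h2]), if_neg (by simp [h3]), ih]
            simp [h1, h2, h3]

-- ===== VERDICT (by name: the statement is the Claim_ definition above) =====
theorem count_spec : Claim_equal_count := by
  intro s _
  unfold Spec_count count count_alt
  have h := count_fold_inv s.toList 0 0
  rw [h]
  have hp : ("+" : String).toList = ['+'] := rfl
  have hm : ("-" : String).toList = ['-'] := rfl
  have hq : ("?" : String).toList = ['?'] := rfl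
  simp [PySem.Str.count, hp, hm, hq, chars_count_singleton]
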